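-- pv_equiv track=rewrite | github.com/BaileyWei/code-accumulation | seed_1/ner_hf_baseline.py | extract_span_entity
-- ===== SOURCE A (Python) =====
-- def extract_span_entity(start_pred, end_pred):
--     entity_span = list()
--     for i, s_l in enumerate(start_pred):
--         if s_l == 0:
--             continue
--         for j, e_l in enumerate(end_pred[i:]):
--             if s_l == e_l:
--                 entity_span.append((i, i + j))
--     return entity_span
-- ===== SOURCE B (Python) =====
-- def extract_span_entity(start_pred, end_pred):
--     pos = {}
--     for j, e in enumerate(end_pred):
--         pos.setdefault(e, []).append(j)
--     out = []
--     ap = out.append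
--     for i, s in enumerate(start_pred):
--         if s != 0:
--             for j in pos.get(s, []):
--                 if j >= i:
--                     ap((i, j))
--     return out
-- ===== Notes on version B (the rewrite author's own statement) =====
-- stated objective: alternative
-- what changed: Builds a label-to-end-positions index in one pass over end_pred, so each nonzero start emits pairs from its own label's position list instead of re-scanning the sliced tail of end_pred.
import Mathlib
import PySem

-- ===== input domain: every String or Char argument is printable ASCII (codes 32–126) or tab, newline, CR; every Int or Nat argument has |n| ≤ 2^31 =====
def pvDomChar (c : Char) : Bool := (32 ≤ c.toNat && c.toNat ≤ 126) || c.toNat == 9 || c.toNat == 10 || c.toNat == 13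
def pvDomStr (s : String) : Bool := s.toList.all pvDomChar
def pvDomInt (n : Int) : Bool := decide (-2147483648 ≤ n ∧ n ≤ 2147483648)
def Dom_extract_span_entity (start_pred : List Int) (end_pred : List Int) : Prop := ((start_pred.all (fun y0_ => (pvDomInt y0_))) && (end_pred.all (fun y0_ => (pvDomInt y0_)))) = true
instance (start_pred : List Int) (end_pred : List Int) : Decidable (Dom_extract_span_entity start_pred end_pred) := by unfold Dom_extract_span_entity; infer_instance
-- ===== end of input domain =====

-- B builds a label-to-end-positions index in one pass; each nonzero start then emits pairs from its own label's position list.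

-- ===== PORT A =====
def extract_span_entity (start_pred : List Int) (end_pred : List Int) : List (Int × Int) :=
  (PySem.List.enumerate start_pred).foldl (fun acc p =>
    if p.2 == 0 then acc
    else (PySem.List.enumerate (PySem.List.slice end_pred (some p.1) none)).foldl
      (fun acc2 q => if p.2 == q.2 then acc2 ++ [(p.1, p.1 + q.1)] else acc2) acc) []

-- ===== PORT B =====
def extract_span_entity_alt (start_pred : List Int) (end_pred : List Int) : List (Int × Int) :=
  let pos : PySem.Dict Int (List Int) :=
    (PySem.List.enumerate end_pred).foldl (fun d q => d.modify q.2 [] (fun l => l ++ [q.1])) PySem.Dict.empty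
  (PySem.List.enumerate start_pred).foldl (fun acc p =>
    if p.2 != 0 then
      (pos.getD p.2 []).foldl (fun acc2 j => if p.1 ≤ j then acc2 ++ [(p.1, j)] else acc2) acc
    else acc) []

-- ===== PRECONDITION & SPEC =====
def Spec_extract_span_entity (start_pred : List Int) (end_pred : List Int) (out : List (Int × Int)) : Prop := out = extract_span_entity_alt start_pred end_pred
instance (start_pred : List Int) (end_pred : List Int) (out : List (Int × Int)) : Decidable (Spec_extract_span_entity start_pred end_pred out) := by unfold Spec_extract_span_entity; infer_instance

-- ===== CLAIM (what is proved, stated in full; the proofs are below) =====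
def Claim_equal_extract_span_entity : Prop := ∀ (start_pred : List Int) (end_pred : List Int), Dom_extract_span_entity start_pred end_pred → Spec_extract_span_entity start_pred end_pred (extract_span_entity start_pred end_pred)

-- ===== LEMMAS AND PROOFS =====

-- the label→positions dict looks up exactly the (in-order) indices carrying that label
theorem pos_getD (ep : List Int) (s : Int) :
    (((PySem.List.enumerate ep).foldl (fun d q => d.modify q.2 [] (fun l => l ++ [q.1])) PySem.Dict.empty).getD s [])
      = (((PySem.List.enumerate ep).filter (fun q => q.2 == s)).map (·.1)) := by
  have h := PySem.Dict.getD_foldl_modify_append ((PySem.List.enumerate ep).map (fun q => (q.2, q.1))) (PySem.Dict.empty) s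
  simp only [List.foldl_map, List.filter_map] at h
  simpa [List.map_map, Function.comp] using h

-- enumerate with a shifted start
theorem enum_shift {α : Type} (xs : List α) (a b : Int) :
    PySem.List.enumerate xs (a + b) = (PySem.List.enumerate xs b).map (fun p => (a + p.1, p.2)) := by
  induction xs generalizing b with
  | nil => simp [PySem.List.enumerate_nil]
  | cons x xs ih =>
      simp [PySem.List.enumerate_cons, ← ih (b + 1), add_assoc]

-- per-start equality of A's inner scan (as a filtered map) with B's indexed lookup
theorem per_start (ep : List Int) (n : Nat) (s : Int) :
    ((PySem.List.enumerate (ep.drop n)).filter (fun q => s == q.2)).map (fun q => ((n : Int), (n : Int) + q.1))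
      = (((((PySem.List.enumerate ep).filter (fun q => q.2 == s)).map (·.1)).filter (fun j => (n : Int) ≤ j)).map (fun j => ((n : Int), j))) := by
  by_cases hn : n ≤ ep.length
  · conv_rhs => rw [← List.take_append_drop n ep]
    rw [PySem.List.enumerate_append]
    have hlen : ((ep.take n).length : Int) = (n : Int) := by
      simp [List.length_take, Nat.min_eq_left hn]
    rw [hlen]
    have hsh : PySem.List.enumerate (ep.drop n) ((0 : Int) + (n : Int))
        = (PySem.List.enumerate (ep.drop n)).map (fun p => ((n : Int) + p.1, p.2)) := by
      simpa using enum_shift (ep.drop n) (n : Int) 0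
    rw [hsh]
    have hdead : ((((PySem.List.enumerate (ep.take n)).filter (fun q => q.2 == s)).map (·.1)).filter (fun j => (n : Int) ≤ j)) = [] := by
      rw [List.filter_eq_nil_iff]
      intro j hj
      rcases List.mem_map.mp hj with ⟨q, hq, rfl⟩
      rcases (PySem.List.mem_enumerate_iff _ _ _).mp (List.mem_of_mem_filter hq) with ⟨k, hk, rfl⟩
      have hk' : k < n := by simpa [List.length_take, Nat.min_eq_left hn] using hk
      simp
      omega
    have hlive : (((PySem.List.enumerate (ep.drop n)).map (fun p => ((n : Int) + p.1, p.2))).filter (fun q => q.2 == s))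
        = ((PySem.List.enumerate (ep.drop n)).filter (fun q => q.2 == s)).map (fun p => ((n : Int) + p.1, p.2)) := by
      rw [List.filter_map]
      rfl
    have hkeep : (((PySem.List.enumerate (ep.drop n)).filter (fun q => q.2 == s)).map (fun p => (n : Int) + p.1)).filter (fun j => (n : Int) ≤ j)
        = ((PySem.List.enumerate (ep.drop n)).filter (fun q => q.2 == s)).map (fun p => (n : Int) + p.1) := by
      rw [List.filter_eq_self]
      intro j hj
      rcases List.mem_map.mp hj with ⟨q, hq, rfl⟩
      rcases (PySem.List.mem_enumerate_iff _ _ _).mp (List.mem_of_mem_filter hq) with ⟨k, hk, rfl⟩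
      simp
    have hcomm : (PySem.List.enumerate (ep.drop n)).filter (fun q => s == q.2)
        = (PySem.List.enumerate (ep.drop n)).filter (fun q => q.2 == s) := by
      apply List.filter_congr
      intro x _
      simp [eq_comm]
    rw [hcomm]
    simp only [List.filter_append, List.map_append, hdead, hlive, List.map_map, Function.comp_def]
    rw [hkeep]
    simp [List.map_map, Function.comp_def]
  · have hdrop : ep.drop n = [] := by
      rw [List.drop_eq_nil_iff]
      omega
    rw [hdrop]
    have hdead : ((((PySem.List.enumerate ep).filter (fun q => q.2 == s)).map (·.1)).filter (fun j => (n : Int) ≤ j)) = [] := by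
      rw [List.filter_eq_nil_iff]
      intro j hj
      rcases List.mem_map.mp hj with ⟨q, hq, rfl⟩
      rcases (PySem.List.mem_enumerate_iff _ _ _).mp (List.mem_of_mem_filter hq) with ⟨k, hk, rfl⟩
      simp
      omega
    rw [hdead]
    simp [PySem.List.enumerate_nil]

theorem extract_span_entity_eq_alt (sp ep : List Int) :
    extract_span_entity sp ep = extract_span_entity_alt sp ep := by
  unfold extract_span_entity extract_span_entity_alt
  apply PySem.List.foldl_congr_mem
  intro acc p hp
  rcases (PySem.List.mem_enumerate_iff _ _ _).mp hp with ⟨k, hk, rfl⟩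
  by_cases h0 : sp[k] = 0
  · simp [h0]
  · have hb : (sp[k] == 0) = false := by simp [h0]
    simp only [hb, Bool.false_eq_true, if_false, bne, Bool.not_false, if_true]
    have hsl : PySem.List.slice ep (some ((0 : Int) + (k : Int))) none = ep.drop k := by
      simp
    rw [hsl, PySem.List.foldl_append_if, PySem.List.foldl_append_ite, pos_getD]
    have := per_start ep k sp[k]
    simp only [zero_add]
    rw [this]

-- ===== VERDICT (by name: the statement is the Claim_ definition above) =====
theorem extract_span_entity_spec : Claim_equal_extract_span_entity := by
  intro sp ep _
  exact extract_span_entity_eq_alt sp ep
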